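-- pv_equiv track=rewrite | github.com/hey-granth/DemoForge | worker/planner.py | _apply_blacklist
-- ===== SOURCE A (Python) =====
-- from typing import List, Dict, Optional
--
-- BLACKLIST_KEYWORDS = [
--     "delete", "remove", "unsubscribe", "deactivate",
--     "pay", "checkout", "purchase", "buy", "payment",
--     "cancel", "close account", "sign out", "log out",
--     "logout", "destroy", "erase", "clear"
-- ]
--
-- def _apply_blacklist(elements: List[Dict]) -> List[Dict]:
--     filtered = []
--
--     for elem in elements:
--         text = elem.get("text", "").lower()
--
--         is_blacklisted = any(
--             keyword in text
--             for keyword in BLACKLIST_KEYWORDS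
--         )
--
--         if not is_blacklisted:
--             filtered.append(elem)
--
--     return filtered
-- ===== SOURCE B (Python) =====
-- from typing import List, Dict, Optional
--
-- BLACKLIST_KEYWORDS = [
--     "delete", "remove", "unsubscribe", "deactivate",
--     "pay", "checkout", "purchase", "buy", "payment",
--     "cancel", "close account", "sign out", "log out",
--     "logout", "destroy", "erase", "clear"
-- ]
--
-- def _apply_blacklist(elements: List[Dict]) -> List[Dict]:
--     texts = [elem.get("text", "").lower() for elem in elements]
--     blacklisted = set()
--     for keyword in BLACKLIST_KEYWORDS:
--         for i, text in enumerate(texts):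
--             if keyword in text:
--                 blacklisted.add(i)
--     return [elem for i, elem in enumerate(elements) if i not in blacklisted]
-- ===== Notes on version B (the rewrite author's own statement) =====
-- stated objective: alternative
-- what changed: Inverts the loop nesting: instead of A's element-major pass that tests each element's text against every keyword and appends the clean ones, B lowercases all texts once, runs a keyword-major marking pass that collects the set of blacklisted indices, and finally keeps the unmarked elements by a comprehension.
import Mathlib
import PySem

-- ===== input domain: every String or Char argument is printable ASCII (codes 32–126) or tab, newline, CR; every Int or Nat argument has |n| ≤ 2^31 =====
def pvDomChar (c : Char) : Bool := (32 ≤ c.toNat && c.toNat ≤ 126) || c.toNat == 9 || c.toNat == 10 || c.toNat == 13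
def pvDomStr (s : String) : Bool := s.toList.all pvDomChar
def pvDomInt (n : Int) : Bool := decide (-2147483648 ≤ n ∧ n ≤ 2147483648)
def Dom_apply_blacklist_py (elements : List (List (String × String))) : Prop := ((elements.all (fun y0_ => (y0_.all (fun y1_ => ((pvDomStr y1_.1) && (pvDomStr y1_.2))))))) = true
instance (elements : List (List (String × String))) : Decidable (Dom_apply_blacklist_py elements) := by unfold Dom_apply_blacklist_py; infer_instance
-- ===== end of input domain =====

-- B replaces A's element-major loop (each element tested against all keywords, appended if clean)
-- by a keyword-major marking pass: it builds a set of blacklisted indices and then keeps the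
-- unmarked elements — an alternative traversal order with the same cost.


-- ===== PORT A =====
def pvBlacklist : List String :=
  ["delete", "remove", "unsubscribe", "deactivate",
   "pay", "checkout", "purchase", "buy", "payment",
   "cancel", "close account", "sign out", "log out",
   "logout", "destroy", "erase", "clear"]

def apply_blacklist_py (elements : List (List (String × String))) : List (List (String × String)) :=
  elements.foldl (fun filtered elem =>
    let text := PySem.Str.lower (PySem.Dict.getD (PySem.Dict.mk elem) "text" "")
    let is_blacklisted := pvBlacklist.any (fun keyword => PySem.Str.isIn keyword text)
    if !is_blacklisted then filtered ++ [elem] else filtered) []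

-- ===== PORT B =====
def apply_blacklist_py_alt (elements : List (List (String × String))) : List (List (String × String)) :=
  let texts := elements.map (fun elem => PySem.Str.lower (PySem.Dict.getD (PySem.Dict.mk elem) "text" ""))
  let blacklisted : PySem.Set Int := pvBlacklist.foldl (fun bl keyword =>
    (PySem.List.enumerate texts).foldl (fun bl p =>
      if PySem.Str.isIn keyword p.2 then PySem.Set.add bl p.1 else bl) bl) PySem.Set.empty
  (PySem.List.enumerate elements).filterMap (fun p =>
    if !(PySem.Set.contains blacklisted p.1) then some p.2 else none)

-- ===== PRECONDITION & SPEC =====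
def Spec_apply_blacklist_py (elements : List (List (String × String))) (out : List (List (String × String))) : Prop := out = apply_blacklist_py_alt elements
instance (elements : List (List (String × String))) (out : List (List (String × String))) : Decidable (Spec_apply_blacklist_py elements out) := by unfold Spec_apply_blacklist_py; infer_instance

-- ===== CLAIM (what is proved, stated in full; the proofs are below) =====
def Claim_equal_apply_blacklist_py : Prop := ∀ (elements : List (List (String × String))), Dom_apply_blacklist_py elements → Spec_apply_blacklist_py elements (apply_blacklist_py elements)

-- ===== LEMMAS AND PROOFS =====

-- membership after the inner marking loop over one keyword
theorem pvMemInner (kw : String) (L : List (Int × String)) (s : PySem.Set Int) (x : Int) :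
    x ∈ L.foldl (fun bl p => if PySem.Str.isIn kw p.2 then PySem.Set.add bl p.1 else bl) s
      ↔ x ∈ s ∨ ∃ p ∈ L, p.1 = x ∧ PySem.Str.isIn kw p.2 := by
  induction L generalizing s with
  | nil => simp
  | cons p t ih =>
    simp only [List.foldl_cons]
    by_cases h : PySem.Str.isIn kw p.2 = true
    · rw [if_pos h, ih]
      simp only [PySem.Set.mem_add, List.mem_cons]
      constructor
      · rintro ((hs | rfl) | ⟨q, hq, hq1, hq2⟩)
        · exact Or.inl hs
        · exact Or.inr ⟨p, Or.inl rfl, rfl, h⟩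
        · exact Or.inr ⟨q, Or.inr hq, hq1, hq2⟩
      · rintro (hs | ⟨q, hq | hq, hq1, hq2⟩)
        · exact Or.inl (Or.inl hs)
        · subst hq; exact Or.inl (Or.inr hq1.symm)
        · exact Or.inr ⟨q, hq, hq1, hq2⟩
    · rw [if_neg h, ih]
      simp only [List.mem_cons]
      constructor
      · rintro (hs | ⟨q, hq, hq1, hq2⟩)
        · exact Or.inl hs
        · exact Or.inr ⟨q, Or.inr hq, hq1, hq2⟩
      · rintro (hs | ⟨q, hq | hq, hq1, hq2⟩)
        · exact Or.inl hs
        · subst hq; exact absurd hq2 h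
        · exact Or.inr ⟨q, hq, hq1, hq2⟩

-- membership after the whole keyword-major marking pass
theorem pvMemOuter (K : List String) (L : List (Int × String)) (s : PySem.Set Int) (x : Int) :
    x ∈ K.foldl (fun bl kw =>
        L.foldl (fun bl p => if PySem.Str.isIn kw p.2 then PySem.Set.add bl p.1 else bl) bl) s
      ↔ x ∈ s ∨ ∃ kw ∈ K, ∃ p ∈ L, p.1 = x ∧ PySem.Str.isIn kw p.2 := by
  induction K generalizing s with
  | nil => simp
  | cons kw t ih =>
    simp only [List.foldl_cons]
    rw [ih]
    simp only [pvMemInner]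
    constructor
    · rintro ((h | h) | ⟨k, hk, h⟩)
      · exact Or.inl h
      · exact Or.inr ⟨kw, by simp, h⟩
      · exact Or.inr ⟨k, by simp [hk], h⟩
    · rintro (h | ⟨k, hk, h⟩)
      · exact Or.inl (Or.inl h)
      · rcases List.mem_cons.mp hk with rfl | hk
        · exact Or.inl (Or.inr h)
        · exact Or.inr ⟨k, hk, h⟩

-- a filterMap over enumerate whose index test agrees pointwise with a predicate is a filter
theorem pvFilterEnum {α : Type} (xs : List α) (s : Int) (g : Int → Bool) (f : α → Bool)
    (h : ∀ (k : Nat) (hk : k < xs.length), g (s + k) = f xs[k]) :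
    (PySem.List.enumerate xs s).filterMap (fun p => if g p.1 then some p.2 else none)
      = xs.filter f := by
  induction xs generalizing s with
  | nil => simp [PySem.List.enumerate]
  | cons a t ih =>
    rw [PySem.List.enumerate_cons]
    have h0 : g s = f a := by simpa using h 0 (by simp)
    have ht : ∀ (k : Nat) (hk : k < t.length), g (s + 1 + k) = f t[k] := by
      intro k hk
      have := h (k + 1) (by simpa using Nat.succ_lt_succ hk)
      simpa [add_assoc, add_comm, add_left_comm] using this
    simp only [List.filterMap_cons, List.filter_cons, h0]
    cases hfa : f a <;> simp [ih (s + 1) ht]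

theorem pvContainsBl (elements : List (List (String × String))) (k : Nat)
    (hk : k < elements.length) :
    PySem.Set.contains
      (pvBlacklist.foldl (fun bl keyword =>
        (PySem.List.enumerate (elements.map (fun elem =>
            PySem.Str.lower (PySem.Dict.getD (PySem.Dict.mk elem) "text" "")))).foldl
          (fun bl p => if PySem.Str.isIn keyword p.2 then PySem.Set.add bl p.1 else bl) bl)
        PySem.Set.empty) (k : Int)
      = pvBlacklist.any (fun keyword =>
          PySem.Str.isIn keyword (PySem.Str.lower (PySem.Dict.getD (PySem.Dict.mk elements[k]) "text" ""))) := by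
  rw [Bool.eq_iff_iff, PySem.Set.contains_iff, pvMemOuter, List.any_eq_true]
  simp only [PySem.Set.empty, List.not_mem_nil, false_or,
    PySem.List.mem_enumerate_iff, zero_add]
  constructor
  · rintro ⟨kw, hkw, p, ⟨j, hj, rfl⟩, hfst, hin⟩
    have hjk : j = k := by simp only [] at hfst; exact_mod_cast hfst
    subst hjk
    simp only [List.getElem_map] at hin
    exact ⟨kw, hkw, hin⟩
  · rintro ⟨kw, hkw, hin⟩
    refine ⟨kw, hkw, ((k : Int), _), ⟨k, by simpa using hk, rfl⟩, rfl, ?_⟩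
    simp only [List.getElem_map]
    exact hin

-- ===== VERDICT (by name: the statement is the Claim_ definition above) =====
theorem apply_blacklist_py_spec : Claim_equal_apply_blacklist_py := by
  intro elements _
  show _ = _
  simp only [apply_blacklist_py, apply_blacklist_py_alt]
  have hA := PySem.List.foldl_append_if
    (fun elem : List (String × String) =>
      !pvBlacklist.any (fun keyword =>
        PySem.Str.isIn keyword (PySem.Str.lower (PySem.Dict.getD (PySem.Dict.mk elem) "text" ""))))
    id elements []
  simp only [List.map_id, List.nil_append, id] at hA
  rw [hA]
  rw [pvFilterEnum elements 0
    (fun i => !(PySem.Set.contains _ i))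
    (fun elem => !pvBlacklist.any (fun keyword =>
        PySem.Str.isIn keyword (PySem.Str.lower (PySem.Dict.getD (PySem.Dict.mk elem) "text" ""))))
    (fun k hk => by simp only [zero_add]; rw [pvContainsBl elements k hk])]
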